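-- pv_equiv track=rewrite | github.com/H153165g/sort | sort.py | quick_sort_fixed
-- ===== SOURCE A (Python) =====
-- def quick_sort_fixed(arr):
--     def _quick_sort(arr, swap_count):
--         if len(arr) <= 1:
--             return arr, swap_count
--
--         pivot = arr[len(arr) // 2]
--         left = []
--         middle = []
--         right = []
--
--         for x in arr:
--             if x < pivot:
--                 left.append(x)
--                 swap_count += 1
--             elif x == pivot:
--                 middle.append(x)
--             else:
--                 right.append(x)
--                 swap_count += 1
--
--         sorted_left, left_swaps = _quick_sort(left, swap_count)
--         sorted_right, right_swaps = _quick_sort(right, swap_count)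
--
--         return sorted_left + middle + sorted_right, left_swaps + right_swaps
--
--     sorted_array, swap_count = _quick_sort(arr, 0)
--     return swap_count
-- ===== SOURCE B (Python) =====
-- def quick_sort_fixed(arr):
--     # iterative worklist: each pending segment carries the count accumulated on its path
--     total = 0
--     stack = [(arr, 0)]
--     while stack:
--         a, acc = stack.pop()
--         if len(a) <= 1:
--             total += acc
--             continue
--         pivot = a[len(a) // 2]
--         left = [x for x in a if x < pivot]
--         right = [x for x in a if x > pivot]
--         acc += len(left) + len(right)
--         stack.append((left, acc))
--         stack.append((right, acc))
--     return total
-- ===== Notes on version B (the rewrite author's own statement) =====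
-- stated objective: alternative
-- what changed: Replaces A's recursion, which builds a sorted array it never uses and threads a swap counter through both recursive calls, with an iterative worklist loop over (segment, accumulated-count) pairs that partitions each popped segment and adds the accumulated count when a segment is exhausted; no sorted array is built at all.
import Mathlib
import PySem

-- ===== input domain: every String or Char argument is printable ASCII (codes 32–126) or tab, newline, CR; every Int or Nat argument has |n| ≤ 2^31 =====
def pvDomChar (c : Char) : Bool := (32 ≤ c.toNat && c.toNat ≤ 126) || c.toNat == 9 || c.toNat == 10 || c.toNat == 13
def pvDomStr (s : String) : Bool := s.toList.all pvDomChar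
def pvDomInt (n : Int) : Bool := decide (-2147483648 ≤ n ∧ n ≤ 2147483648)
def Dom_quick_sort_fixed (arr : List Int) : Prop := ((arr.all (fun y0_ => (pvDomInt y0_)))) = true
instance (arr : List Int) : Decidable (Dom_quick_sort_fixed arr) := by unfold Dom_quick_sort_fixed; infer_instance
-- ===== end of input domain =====

-- B replaces A's recursion (which builds a sorted array it never uses and threads a count through
-- both recursive calls) by an iterative worklist of pending segments; objective: simpler.

-- ===== PORT A =====
-- the for-loop body of A's partition pass: one step over state (left, middle, right, swap_count)
def pvStepA (pivot : Int) (st : List Int × List Int × List Int × Int) (x : Int) :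
    List Int × List Int × List Int × Int :=
  if x < pivot then (st.1 ++ [x], st.2.1, st.2.2.1, st.2.2.2 + 1)
  else if x = pivot then (st.1, st.2.1 ++ [x], st.2.2.1, st.2.2.2)
  else (st.1, st.2.1, st.2.2.1 ++ [x], st.2.2.2 + 1)

-- loop characterisation, cited by port A's decreasing_by (the partition lists shrink)
theorem pvStepA_foldl (pivot : Int) (xs : List Int) :
    ∀ (l m r : List Int) (s : Int),
      List.foldl (pvStepA pivot) (l, m, r, s) xs =
        (l ++ xs.filter (fun x => decide (x < pivot)),
         m ++ xs.filter (fun x => decide (x = pivot)),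
         r ++ xs.filter (fun x => decide (pivot < x)),
         s + ((xs.filter (fun x => decide (x < pivot))).length : Int)
           + ((xs.filter (fun x => decide (pivot < x))).length : Int)) := by
  induction xs with
  | nil => intro l m r s; simp
  | cons x xs ih =>
    intro l m r s
    by_cases h1 : x < pivot
    · have hne : ¬ x = pivot := by omega
      have hng : ¬ pivot < x := by omega
      simp [pvStepA, h1, hne, hng, ih]
      omega
    · by_cases h2 : x = pivot
      · have hng : ¬ pivot < x := by omega
        simp [pvStepA, h2, ih]
      · have hg : pivot < x := by omega
        simp [pvStepA, h1, h2, hg, ih]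
        omega

theorem pvFilter_lt_length {l : List Int} {p : Int → Bool} {x : Int}
    (hx : x ∈ l) (hp : p x = false) : (l.filter p).length < l.length := by
  induction l with
  | nil => cases hx
  | cons y ys ih =>
    rcases List.mem_cons.mp hx with h | h
    · subst h
      simp [hp]
      exact List.length_filter_le _ _
    · by_cases hy : p y
      · simpa [hy] using Nat.succ_lt_succ (ih h)
      · simp [hy]
        exact le_of_lt (ih h)

theorem pvPivot_mem (arr : List Int) (h : ¬ arr.length ≤ 1) :
    arr.getD (arr.length / 2) 0 ∈ arr := by
  have hlt : arr.length / 2 < arr.length := by omega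
  rw [List.getD_eq_getElem arr 0 hlt]
  exact List.getElem_mem hlt

theorem pvFilter_lt_lt (a : List Int) (h : ¬ a.length ≤ 1) :
    (a.filter (fun x => decide (x < a.getD (a.length / 2) 0))).length < a.length :=
  pvFilter_lt_length (pvPivot_mem a h) (by simp)

theorem pvFilter_gt_lt (a : List Int) (h : ¬ a.length ≤ 1) :
    (a.filter (fun x => decide (a.getD (a.length / 2) 0 < x))).length < a.length :=
  pvFilter_lt_length (pvPivot_mem a h) (by simp)

-- literal port of A: recursion returns (sorted array, swap count); arr[len//2] is in range here
def quick_sort_fixed_go (arr : List Int) (swap_count : Int) : List Int × Int :=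
  if h : arr.length ≤ 1 then (arr, swap_count)
  else
    let pivot := arr.getD (arr.length / 2) 0
    let st := List.foldl (pvStepA pivot) ([], [], [], swap_count) arr
    let sorted_left := quick_sort_fixed_go st.1 st.2.2.2
    let sorted_right := quick_sort_fixed_go st.2.2.1 st.2.2.2
    (sorted_left.1 ++ st.2.1 ++ sorted_right.1, sorted_left.2 + sorted_right.2)
termination_by arr.length
decreasing_by
  · simp only [List.foldl_attach, pvStepA_foldl, List.nil_append]
    exact pvFilter_lt_lt arr h
  · simp only [List.foldl_attach, pvStepA_foldl, List.nil_append]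
    exact pvFilter_gt_lt arr h

def quick_sort_fixed (arr : List Int) : Int := (quick_sort_fixed_go arr 0).2

-- the filters of B's loop body, restated without the `attach` inserted by well-founded
-- recursion compilation (cited by port B's decreasing_by and the loop invariant proof)
theorem pvUnattachFilter (a : List Int) (p : Int → Bool) :
    (List.filter (fun x : {y : Int // y ∈ a} => p x.1) a.attach).unattach = a.filter p := by
  simp

theorem pvAttachFilterLt (a : List Int) (piv : Int) :
    (List.filter (fun x : {y : Int // y ∈ a} => decide (x.1 < piv)) a.attach).unattach
      = a.filter (fun x => decide (x < piv)) :=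
  pvUnattachFilter a (fun y => decide (y < piv))

theorem pvAttachFilterGt (a : List Int) (piv : Int) :
    (List.filter (fun x : {y : Int // y ∈ a} => decide (piv < x.1)) a.attach).unattach
      = a.filter (fun x => decide (piv < x)) :=
  pvUnattachFilter a (fun y => decide (piv < y))

theorem pvAttachLenLt (a : List Int) (piv : Int) :
    (List.filter (fun x : {y : Int // y ∈ a} => decide (x.1 < piv)) a.attach).length
      = (a.filter (fun x => decide (x < piv))).length := by
  rw [← List.length_unattach, pvAttachFilterLt]

theorem pvAttachLenGt (a : List Int) (piv : Int) :
    (List.filter (fun x : {y : Int // y ∈ a} => decide (piv < x.1)) a.attach).length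
      = (a.filter (fun x => decide (piv < x))).length := by
  rw [← List.length_unattach, pvAttachFilterGt]

-- ===== PORT B =====
-- B's while-loop: a worklist of (segment, accumulated count) pairs, head = top of the stack
-- (Python pushes left then right, so right is popped first: it is the new head here)
def quick_sort_fixed_alt_go : List (List Int × Int) → Int → Int
  | [], total => total
  | (a, acc) :: rest, total =>
    if h : a.length ≤ 1 then quick_sort_fixed_alt_go rest (total + acc)
    else
      let pivot := a.getD (a.length / 2) 0
      let left := a.filter (fun x => decide (x < pivot))
      let right := a.filter (fun x => decide (pivot < x))
      let acc' := acc + (left.length : Int) + (right.length : Int)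
      quick_sort_fixed_alt_go ((right, acc') :: (left, acc') :: rest) total
termination_by s _ => (s.map (fun p => 3 ^ p.1.length)).sum
decreasing_by
  · simp only [List.map_cons, List.sum_cons]
    have : 1 ≤ 3 ^ a.length := Nat.one_le_pow _ _ (by norm_num)
    omega
  · simp only [List.map_cons, List.sum_cons, List.length_unattach, pvAttachLenLt,
      pvAttachLenGt]
    have hl := pvFilter_lt_lt a h
    have hr := pvFilter_gt_lt a h
    have h1 : 3 ^ (a.filter (fun x => decide (x < a.getD (a.length / 2) 0))).length
        ≤ 3 ^ (a.length - 1) := Nat.pow_le_pow_right (by norm_num) (by omega)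
    have h2 : 3 ^ (a.filter (fun x => decide (a.getD (a.length / 2) 0 < x))).length
        ≤ 3 ^ (a.length - 1) := Nat.pow_le_pow_right (by norm_num) (by omega)
    have h3 : 3 ^ a.length = 3 ^ (a.length - 1) * 3 := by
      rw [← pow_succ]
      congr 1
      omega
    have h4 : 1 ≤ 3 ^ (a.length - 1) := Nat.one_le_pow _ _ (by norm_num)
    omega

def quick_sort_fixed_alt (arr : List Int) : Int := quick_sort_fixed_alt_go [(arr, 0)] 0

-- ===== PRECONDITION & SPEC =====
def Spec_quick_sort_fixed (arr : List Int) (out : Int) : Prop := out = quick_sort_fixed_alt arr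
instance (arr : List Int) (out : Int) : Decidable (Spec_quick_sort_fixed arr out) := by unfold Spec_quick_sort_fixed; infer_instance

-- ===== CLAIM (what is proved, stated in full; the proofs are below) =====
def Claim_equal_quick_sort_fixed : Prop := ∀ (arr : List Int), Dom_quick_sort_fixed arr → Spec_quick_sort_fixed arr (quick_sort_fixed arr)

-- ===== LEMMAS AND PROOFS =====
-- invariant: B's worklist loop adds, for each pending segment, exactly A's recursive count for it
theorem pv_loop_eq : ∀ (s : List (List Int × Int)) (t : Int),
    quick_sort_fixed_alt_go s t =
      t + (s.map (fun p => (quick_sort_fixed_go p.1 p.2).2)).sum := by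
  intro s t
  induction s, t using quick_sort_fixed_alt_go.induct with
  | case1 total => simp [quick_sort_fixed_alt_go]
  | case2 a acc rest total h ih =>
    rw [quick_sort_fixed_alt_go]
    simp only [h, dite_true, ih, List.map_cons, List.sum_cons]
    rw [quick_sort_fixed_go]
    simp only [h, dite_true]
    ring
  | case3 a acc rest total h pivot left right acc' ih =>
    rw [quick_sort_fixed_alt_go]
    have e1 : left = a.filter (fun x => decide (x < a.getD (a.length / 2) 0)) :=
      pvAttachFilterLt a (a.getD (a.length / 2) 0)
    have e2 : right = a.filter (fun x => decide (a.getD (a.length / 2) 0 < x)) :=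
      pvAttachFilterGt a (a.getD (a.length / 2) 0)
    have e3 : acc' = acc + ((a.filter (fun x => decide (x < a.getD (a.length / 2) 0))).length : Int)
        + ((a.filter (fun x => decide (a.getD (a.length / 2) 0 < x))).length : Int) := by
      rw [show acc' = acc + (left.length : Int) + (right.length : Int) from rfl, e1, e2]
    rw [e1, e2, e3] at ih
    have hgo : (quick_sort_fixed_go a acc).2 =
        (quick_sort_fixed_go (a.filter (fun x => decide (x < a.getD (a.length / 2) 0)))
          (acc + ((a.filter (fun x => decide (x < a.getD (a.length / 2) 0))).length : Int)
            + ((a.filter (fun x => decide (a.getD (a.length / 2) 0 < x))).length : Int))).2 +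
        (quick_sort_fixed_go (a.filter (fun x => decide (a.getD (a.length / 2) 0 < x)))
          (acc + ((a.filter (fun x => decide (x < a.getD (a.length / 2) 0))).length : Int)
            + ((a.filter (fun x => decide (a.getD (a.length / 2) 0 < x))).length : Int))).2 := by
      conv_lhs => rw [quick_sort_fixed_go]
      simp only [h, dite_false, pvStepA_foldl, List.nil_append]
    simp only [h, dite_false, ih, List.map_cons, List.sum_cons, hgo]
    ring

-- ===== VERDICT (by name: the statement is the Claim_ definition above) =====
theorem quick_sort_fixed_spec : Claim_equal_quick_sort_fixed := by
  intro arr _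
  unfold Spec_quick_sort_fixed quick_sort_fixed quick_sort_fixed_alt
  simp [pv_loop_eq]
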